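-- pv_equiv track=rewrite | github.com/JohnScolaro/advent-of-code | 2020/day08/day8.py | get_fixed_instructions
-- ===== SOURCE A (Python) =====
-- def get_fixed_instructions(list_of_instructions: list, i: int) -> list:
--     """Returns a fixed list of instructions.
--
--     Attempts the i'th possible fix to the instructions and returns the fixed
--     list.
--     """
--     possible_change = 0
--     fixed_list_of_instructions = []
--
--     for instruction in list_of_instructions:
--         operation = instruction[:3]
--
--         if operation == 'nop':
--             if possible_change == i:
--                 instruction = 'jmp' + instruction[3:]
--             possible_change += 1
--         elif operation == 'jmp':
--             if possible_change == i:
--                 instruction = 'nop' + instruction[3:]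
--             possible_change += 1
--         fixed_list_of_instructions.append(instruction)
--
--     return fixed_list_of_instructions
-- ===== SOURCE B (Python) =====
-- def get_fixed_instructions(list_of_instructions: list, i: int) -> list:
--     """Returns a fixed list of instructions.
--
--     Attempts the i'th possible fix to the instructions and returns the fixed
--     list.
--     """
--     positions = [idx for idx, instr in enumerate(list_of_instructions)
--                  if instr[:3] in ('nop', 'jmp')]
--     result = list(list_of_instructions)
--     if 0 <= i < len(positions):
--         idx = positions[i]
--         op = result[idx][:3]
--         result[idx] = ('jmp' if op == 'nop' else 'nop') + result[idx][3:]
--     return result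
-- ===== Notes on version B (the rewrite author's own statement) =====
-- stated objective: alternative
-- what changed: A rebuilds the whole output list while threading a counter and swapping inline; B collects the indices of all nop/jmp instructions in one enumerate-filter pass, copies the list, and performs a single targeted edit at positions[i] (guarded by 0 <= i < len(positions)).
import Mathlib
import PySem

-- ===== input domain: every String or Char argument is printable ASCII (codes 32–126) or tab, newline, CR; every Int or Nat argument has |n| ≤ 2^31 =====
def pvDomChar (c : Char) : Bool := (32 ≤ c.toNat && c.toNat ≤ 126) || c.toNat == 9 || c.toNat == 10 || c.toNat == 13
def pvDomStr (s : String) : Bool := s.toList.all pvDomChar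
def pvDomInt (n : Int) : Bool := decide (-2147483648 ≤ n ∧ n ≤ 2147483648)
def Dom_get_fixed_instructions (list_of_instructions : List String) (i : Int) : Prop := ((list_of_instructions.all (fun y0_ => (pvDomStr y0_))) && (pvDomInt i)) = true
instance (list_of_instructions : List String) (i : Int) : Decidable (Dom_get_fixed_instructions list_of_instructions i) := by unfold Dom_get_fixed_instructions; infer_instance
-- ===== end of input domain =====

-- B replaces A's counting rebuild of the whole list by an index-building pass plus one
-- targeted in-place edit (objective: alternative decomposition; same asymptotic cost).

-- ===== PORT A =====
-- string concatenation 'a' + 'b' is ported exactly as String.ofList (a.toList ++ b.toList)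
def get_fixed_instructions (list_of_instructions : List String) (i : Int) : List String :=
  (list_of_instructions.foldl
    (fun (st : Int × List String) instruction =>
      let possible_change := st.1
      let acc := st.2
      let operation := PySem.Str.slice instruction none (some 3)
      if operation = "nop" then
        let instruction :=
          if possible_change = i then
            String.ofList ("jmp".toList ++ (PySem.Str.slice instruction (some 3) none).toList)
          else instruction
        (possible_change + 1, acc ++ [instruction])
      else if operation = "jmp" then
        let instruction :=
          if possible_change = i then
            String.ofList ("nop".toList ++ (PySem.Str.slice instruction (some 3) none).toList)
          else instruction
        (possible_change + 1, acc ++ [instruction])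
      else
        (possible_change, acc ++ [instruction]))
    ((0 : Int), ([] : List String))).2

-- ===== PORT B =====
def get_fixed_instructions_alt (list_of_instructions : List String) (i : Int) : List String :=
  let positions : List Int :=
    ((PySem.List.enumerate list_of_instructions 0).filter
      (fun p => (["nop", "jmp"] : List String).contains (PySem.Str.slice p.2 none (some 3)))).map (·.1)
  if 0 ≤ i ∧ i < (positions.length : Int) then
    -- the guard makes both indexings in range, so the total forms are exact here
    let idx := PySem.List.pyGetD positions i 0
    let instr := PySem.List.pyGetD list_of_instructions idx ""
    let op := PySem.Str.slice instr none (some 3)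
    let newv := String.ofList
      ((if op = "nop" then "jmp" else "nop").toList ++ (PySem.Str.slice instr (some 3) none).toList)
    PySem.List.pySetD list_of_instructions idx newv
  else list_of_instructions

-- ===== PRECONDITION & SPEC =====
def Spec_get_fixed_instructions (list_of_instructions : List String) (i : Int) (out : List String) : Prop := out = get_fixed_instructions_alt list_of_instructions i
instance (list_of_instructions : List String) (i : Int) (out : List String) : Decidable (Spec_get_fixed_instructions list_of_instructions i out) := by unfold Spec_get_fixed_instructions; infer_instance

-- ===== CLAIM (what is proved, stated in full; the proofs are below) =====
def Claim_equal_get_fixed_instructions : Prop := ∀ (list_of_instructions : List String) (i : Int), Dom_get_fixed_instructions list_of_instructions i → Spec_get_fixed_instructions list_of_instructions i (get_fixed_instructions list_of_instructions i)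

-- ===== LEMMAS AND PROOFS =====

-- is the instruction's 3-char opcode swappable?
def pvSw (s : String) : Bool := (["nop", "jmp"] : List String).contains (PySem.Str.slice s none (some 3))

-- the swapped instruction
def pvSwap (s : String) : String :=
  String.ofList ((if PySem.Str.slice s none (some 3) = "nop" then "jmp" else "nop").toList
                 ++ (PySem.Str.slice s (some 3) none).toList)

-- common reference implementation: swap the j'th swappable instruction
def pvRef (xs : List String) (j : Int) : List String :=
  match xs with
  | [] => []
  | x :: r =>
      if pvSw x then (if j = 0 then pvSwap x else x) :: pvRef r (j - 1)
      else x :: pvRef r j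

-- number of swappable instructions
def pvCnt (xs : List String) : Nat := (xs.filter pvSw).length

theorem pvCnt_cons (x : String) (r : List String) :
    pvCnt (x :: r) = (if pvSw x = true then pvCnt r + 1 else pvCnt r) := by
  simp only [pvCnt, List.filter_cons]
  split_ifs <;> simp

theorem pvRef_out (xs : List String) (j : Int) (h : j < 0 ∨ (pvCnt xs : Int) ≤ j) :
    pvRef xs j = xs := by
  induction xs generalizing j with
  | nil => rfl
  | cons x r ih =>
      rw [pvCnt_cons] at h
      by_cases hs : pvSw x
      · rw [if_pos hs] at h
        have hj : ¬ j = 0 := by push_cast at h; omega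
        rw [pvRef, if_pos hs, if_neg hj, ih (j - 1) (by push_cast at h ⊢; omega)]
      · rw [if_neg hs] at h
        rw [pvRef, if_neg hs, ih j h]

-- A's loop, from counter c, appends pvRef xs (i - c) to the accumulator
theorem portA_eq_ref (xs : List String) (i : Int) :
    ∀ (c : Int) (acc : List String),
    (xs.foldl
      (fun (st : Int × List String) instruction =>
        let possible_change := st.1
        let acc := st.2
        let operation := PySem.Str.slice instruction none (some 3)
        if operation = "nop" then
          let instruction :=
            if possible_change = i then
              String.ofList ("jmp".toList ++ (PySem.Str.slice instruction (some 3) none).toList)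
            else instruction
          (possible_change + 1, acc ++ [instruction])
        else if operation = "jmp" then
          let instruction :=
            if possible_change = i then
              String.ofList ("nop".toList ++ (PySem.Str.slice instruction (some 3) none).toList)
            else instruction
          (possible_change + 1, acc ++ [instruction])
        else
          (possible_change, acc ++ [instruction]))
      (c, acc)).2 = acc ++ pvRef xs (i - c) := by
  induction xs with
  | nil => intro c acc; simp [pvRef]
  | cons x r ih =>
      intro c acc
      simp only [List.foldl_cons]
      by_cases hn : PySem.Str.slice x none (some 3) = "nop"
      · have hsw : pvSw x = true := by simp [pvSw, hn]
        by_cases hc : c = i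
        · subst hc
          simp only [hn, if_true, ih, pvRef, hsw, pvSwap, sub_self]
          simp [show c - (c + 1) = c - c - 1 by ring]
        · simp only [hn, if_true, if_neg hc, ih, pvRef, hsw, pvSwap]
          have : ¬ i - c = 0 := by omega
          simp [this, show i - (c + 1) = i - c - 1 by ring]
      · by_cases hj : PySem.Str.slice x none (some 3) = "jmp"
        · have hsw : pvSw x = true := by simp [pvSw, hj]
          by_cases hc : c = i
          · subst hc
            simp only [hn, hj, if_true, ih, pvRef, hsw, pvSwap, sub_self]
            simp [show c - (c + 1) = c - c - 1 by ring]
          · simp only [hn, hj, if_true, if_neg hc, ih, pvRef, hsw, pvSwap]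
            have : ¬ i - c = 0 := by omega
            simp [this, show i - (c + 1) = i - c - 1 by ring]
        · have hsw : pvSw x = false := by simp [pvSw, hn, hj]
          simp only [hn, hj, ih, pvRef, hsw]
          simp

theorem portA_eq (xs : List String) (i : Int) : get_fixed_instructions xs i = pvRef xs i := by
  have := portA_eq_ref xs i 0 []
  simpa [get_fixed_instructions] using this

-- B's positions list, generalized over the enumeration start
def pvPos (xs : List String) (s : Int) : List Int :=
  ((PySem.List.enumerate xs s).filter (fun p => pvSw p.2)).map (·.1)

-- B's targeted edit at (absolute) index j
def pvApply (xs : List String) (j : Int) : List String :=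
  PySem.List.pySetD xs j (pvSwap (PySem.List.pyGetD xs j ""))

theorem pvPos_nil (s : Int) : pvPos [] s = [] := by
  simp [pvPos, PySem.List.enumerate_nil]

theorem pvPos_cons (x : String) (r : List String) (s : Int) :
    pvPos (x :: r) s = (if pvSw x then s :: pvPos r (s + 1) else pvPos r (s + 1)) := by
  by_cases h : pvSw x <;> simp [pvPos, PySem.List.enumerate_cons, h]

theorem pvPos_length (xs : List String) (s : Int) : (pvPos xs s).length = pvCnt xs := by
  induction xs generalizing s with
  | nil => simp [pvPos_nil, pvCnt]
  | cons x r ih =>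
      rw [pvPos_cons, pvCnt_cons]
      by_cases h : pvSw x <;> simp [h, ih]

theorem pvPos_mem_lb (xs : List String) (s : Int) (j : Int) (h : j ∈ pvPos xs s) : s ≤ j := by
  induction xs generalizing s with
  | nil => rw [pvPos_nil] at h; simp at h
  | cons x r ih =>
      rw [pvPos_cons] at h
      by_cases hx : pvSw x
      · rw [if_pos hx] at h
        rcases List.mem_cons.1 h with h1 | h2
        · omega
        · have := ih (s + 1) h2; omega
      · rw [if_neg hx] at h
        have := ih (s + 1) h; omega

theorem pyGetD_cons_pos {α : Type} (a : α) (l : List α) (i : Int) (d : α) (h : 1 ≤ i) :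
    PySem.List.pyGetD (a :: l) i d = PySem.List.pyGetD l (i - 1) d := by
  simp only [PySem.List.pyGetD, PySem.List.pyGet?, PySem.List.pyIdx?, List.length_cons]
  rw [if_pos (show (0:Int) ≤ i by omega), if_pos (show (0:Int) ≤ i - 1 by omega)]
  by_cases hlt : i < ((l.length : Int) + 1)
  · rw [if_pos (by push_cast; omega), if_pos (by push_cast; omega)]
    have hti : i.toNat = (i - 1).toNat + 1 := by omega
    rw [hti]
    simp
  · rw [if_neg (by push_cast; omega), if_neg (by push_cast; omega)]
    rfl

theorem pySetD_cons_pos {α : Type} (a : α) (l : List α) (i : Int) (v : α) (h : 1 ≤ i) :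
    PySem.List.pySetD (a :: l) i v = a :: PySem.List.pySetD l (i - 1) v := by
  rw [PySem.List.pySetD_of_nonneg _ _ (show (0:Int) ≤ i by omega),
      PySem.List.pySetD_of_nonneg _ _ (show (0:Int) ≤ i - 1 by omega)]
  have hti : i.toNat = (i - 1).toNat + 1 := by omega
  rw [hti]
  simp

theorem pvApply_zero (x : String) (r : List String) : pvApply (x :: r) 0 = pvSwap x :: r := by
  rw [pvApply, PySem.List.pyGetD_zero_cons,
      PySem.List.pySetD_of_nonneg _ _ (show (0:Int) ≤ 0 by omega)]
  simp

theorem pvApply_cons_pos (x : String) (r : List String) (j : Int) (h : 1 ≤ j) :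
    pvApply (x :: r) j = x :: pvApply r (j - 1) := by
  rw [pvApply, pyGetD_cons_pos _ _ _ _ h, pySetD_cons_pos _ _ _ _ h, pvApply]

-- B's guarded targeted edit, generalized over the enumeration start
def pvEdit (xs : List String) (i : Int) (s : Int) : List String :=
  if 0 ≤ i ∧ i < ((pvPos xs s).length : Int) then
    pvApply xs (PySem.List.pyGetD (pvPos xs s) i 0 - s)
  else xs

theorem pvEdit_eq_ref (xs : List String) (i : Int) (s : Int) : pvEdit xs i s = pvRef xs i := by
  induction xs generalizing i s with
  | nil =>
      rw [pvEdit, if_neg (by rw [pvPos_nil]; simp)]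
      rfl
  | cons x r ih =>
      have hp := pvPos_cons x r s
      by_cases hg : 0 ≤ i ∧ i < ((pvPos (x :: r) s).length : Int)
      · rw [pvEdit, if_pos hg]
        rw [hp] at hg ⊢
        by_cases hx : pvSw x
        · rw [if_pos hx] at hg ⊢
          by_cases hi : i = 0
          · subst hi
            rw [PySem.List.pyGetD_zero_cons, show s - s = (0:Int) by ring, pvApply_zero,
                pvRef, if_pos hx, if_pos rfl, pvRef_out r (0 - 1) (by left; omega)]
          · have h1 : (1:Int) ≤ i := by omega
            rw [pyGetD_cons_pos _ _ _ _ h1]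
            have hmem : PySem.List.pyGetD (pvPos r (s + 1)) (i - 1) 0 ∈ pvPos r (s + 1) := by
              apply PySem.List.pyGetD_mem
              refine ⟨by omega, ?_⟩
              have := hg.2
              simp only [List.length_cons] at this
              push_cast at this ⊢
              omega
            have hlb := pvPos_mem_lb r (s + 1) _ hmem
            rw [pvApply_cons_pos _ _ _ (by omega), pvRef, if_pos hx, if_neg hi,
                show PySem.List.pyGetD (pvPos r (s + 1)) (i - 1) 0 - s - 1
                   = PySem.List.pyGetD (pvPos r (s + 1)) (i - 1) 0 - (s + 1) by ring]
            have hih := ih (i - 1) (s + 1)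
            rw [pvEdit, if_pos ?_] at hih
            · rw [hih]
            · refine ⟨by omega, ?_⟩
              have := hg.2
              simp only [List.length_cons] at this
              push_cast at this ⊢
              omega
        · rw [if_neg hx] at hg ⊢
          have hmem : PySem.List.pyGetD (pvPos r (s + 1)) i 0 ∈ pvPos r (s + 1) := by
            apply PySem.List.pyGetD_mem
            exact ⟨by omega, by push_cast; omega⟩
          have hlb := pvPos_mem_lb r (s + 1) _ hmem
          rw [pvApply_cons_pos _ _ _ (by omega), pvRef, if_neg hx,
              show PySem.List.pyGetD (pvPos r (s + 1)) i 0 - s - 1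
                 = PySem.List.pyGetD (pvPos r (s + 1)) i 0 - (s + 1) by ring]
          have hih := ih i (s + 1)
          rw [pvEdit, if_pos ⟨hg.1, hg.2⟩] at hih
          rw [hih]
      · rw [pvEdit, if_neg hg]
        rw [pvPos_length] at hg
        exact (pvRef_out (x :: r) i (by push_cast at hg ⊢; omega)).symm

theorem portB_eq (xs : List String) (i : Int) : get_fixed_instructions_alt xs i = pvEdit xs i 0 := by
  simp only [get_fixed_instructions_alt, pvEdit, pvApply, pvPos, pvSw, pvSwap, sub_zero]

-- ===== VERDICT (by name: the statement is the Claim_ definition above) =====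
theorem get_fixed_instructions_spec : Claim_equal_get_fixed_instructions := by
  intro xs i _
  unfold Spec_get_fixed_instructions
  rw [portA_eq, portB_eq, pvEdit_eq_ref]
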